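-- pv_equiv track=rewrite | github.com/JustinPelpoir/pychatbot-pelpoir-taillefer-a | functions.py | mots_questions
-- ===== SOURCE A (Python) =====
-- def mots_questions(question):
--     question_minuscule = ""
--     question_clean = ""
--
--     # Conversion minuscule
--     for mot in question:
--         for caractere in mot:
--             if ord(caractere) >= 65 and ord(caractere) <= 90:
--                 question_minuscule = question_minuscule + chr(ord(caractere) + 32)
--             else:
--                 question_minuscule = question_minuscule + caractere
--
--     # Retrait des ponctuations
--     for mot in question_minuscule:
--         for caractere in mot:
--
--             # Code ASCII des ponctuations
--             liste_ponctuation_retrait = [33, 34, 44,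
--                                          46, 58, 59, 63,
--                                          96, 130, 132,
--                                          133, 145, 146,
--                                          147, 148, 149,
--                                          ]
--
--             # Remplacer les ponctuations par un blanc
--             if ord(caractere) in liste_ponctuation_retrait:
--                 question_clean += ""
--
--             # Remplacer "-"  par un espace
--             elif ord(caractere) == 45:
--                 question_clean += " "
--             # Remplacer les apostrophe par "e "
--             elif ord(caractere) == 39:
--                 question_clean += "e "
--             else:
--                 question_clean += caractere
--
--     liste_mot_question = question_clean.split(" ")
--
--     return liste_mot_question
-- ===== SOURCE B (Python) =====
-- def mots_questions(question):
--     table = {n: chr(n + 32) for n in range(65, 91)}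
--     for n in (33, 34, 44, 46, 58, 59, 63, 96, 130, 132, 133, 145, 146, 147, 148, 149):
--         table[n] = None
--     table[45] = " "
--     table[39] = "e "
--     return "".join(question).translate(table).split(" ")
-- ===== Notes on version B (the rewrite author's own statement) =====
-- stated objective: idiomatic
-- what changed: Replaces A's two sequential character-by-character string-rebuilding passes (one for lowercasing, one for the punctuation branch cascade) with a single translation table built once and one str.translate pass, then split.
import Mathlib
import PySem

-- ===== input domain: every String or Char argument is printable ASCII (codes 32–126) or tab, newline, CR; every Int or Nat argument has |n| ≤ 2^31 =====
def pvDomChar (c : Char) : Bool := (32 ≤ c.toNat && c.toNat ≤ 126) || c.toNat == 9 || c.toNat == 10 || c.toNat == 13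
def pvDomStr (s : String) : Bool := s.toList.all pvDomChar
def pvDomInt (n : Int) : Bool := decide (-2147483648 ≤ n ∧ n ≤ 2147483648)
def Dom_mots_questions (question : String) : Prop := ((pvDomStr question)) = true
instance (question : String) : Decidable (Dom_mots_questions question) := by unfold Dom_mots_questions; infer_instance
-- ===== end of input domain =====

-- B replaces A's two character-by-character rebuild passes (lowercase pass, then punctuation pass)
-- with one table-driven translate pass over the string; same return value on the ASCII domain.

-- ===== PORT A =====
def mots_questions (question : String) : List String :=
  let question_minuscule : List Char :=
    question.toList.foldl (fun acc caractere =>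
      if 65 ≤ caractere.toNat ∧ caractere.toNat ≤ 90 then
        acc ++ [Char.ofNat (caractere.toNat + 32)]
      else
        acc ++ [caractere]) []
  let question_clean : List Char :=
    question_minuscule.foldl (fun acc caractere =>
      if caractere.toNat ∈ ([33, 34, 44, 46, 58, 59, 63, 96, 130, 132, 133, 145, 146, 147, 148, 149] : List Nat) then
        acc
      else if caractere.toNat = 45 then acc ++ [' ']
      else if caractere.toNat = 39 then acc ++ ['e', ' ']
      else acc ++ [caractere]) []
  (PySem.Chars.splitOn question_clean [' ']).map String.ofList

-- ===== PORT B =====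
-- the translation table of Source B: 65..90 ↦ lowercase, punctuation codes ↦ delete, 45 ↦ " ", 39 ↦ "e "
def pvTableB : PySem.Dict Nat (Option (List Char)) :=
  let t : PySem.Dict Nat (Option (List Char)) :=
    (List.range' 65 26).foldl (fun d n => d.insert n (some [Char.ofNat (n + 32)])) PySem.Dict.empty
  let t := ([33, 34, 44, 46, 58, 59, 63, 96, 130, 132, 133, 145, 146, 147, 148, 149] : List Nat).foldl
      (fun d n => d.insert n none) t
  let t := t.insert 45 (some [' '])
  t.insert 39 (some ['e', ' '])

-- str.translate's rule for one character: absent key ↦ keep, value None ↦ delete, value str ↦ substitute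
def pvTranslateB (c : Char) : List Char :=
  match pvTableB.get? c.toNat with
  | none => [c]
  | some none => []
  | some (some r) => r

def mots_questions_alt (question : String) : List String :=
  (PySem.Chars.splitOn (question.toList.flatMap pvTranslateB) [' ']).map String.ofList

-- ===== PRECONDITION & SPEC =====
def Spec_mots_questions (question : String) (out : List String) : Prop := out = mots_questions_alt question
instance (question : String) (out : List String) : Decidable (Spec_mots_questions question out) := by unfold Spec_mots_questions; infer_instance

-- ===== CLAIM (what is proved, stated in full; the proofs are below) =====
def Claim_equal_mots_questions : Prop := ∀ (question : String), Dom_mots_questions question → Spec_mots_questions question (mots_questions question)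

-- ===== LEMMAS AND PROOFS =====
-- per-character meaning of A's first pass
def pvLower1 (c : Char) : Char :=
  if 65 ≤ c.toNat ∧ c.toNat ≤ 90 then Char.ofNat (c.toNat + 32) else c

-- per-character meaning of A's second pass
def pvClean1 (c : Char) : List Char :=
  if c.toNat ∈ ([33, 34, 44, 46, 58, 59, 63, 96, 130, 132, 133, 145, 146, 147, 148, 149] : List Nat) then []
  else if c.toNat = 45 then [' ']
  else if c.toNat = 39 then ['e', ' ']
  else [c]

-- the composed per-character map of A agrees with B's table lookup on the whole domain
set_option maxRecDepth 100000 in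
theorem pv_key : ∀ n ∈ List.range 127, pvClean1 (pvLower1 (Char.ofNat n)) = pvTranslateB (Char.ofNat n) := by
  decide

set_option maxRecDepth 100000 in
theorem pv_flatMap_congr (l : List Char) (h : ∀ c ∈ l, pvDomChar c = true) :
    l.flatMap (fun c => pvClean1 (pvLower1 c)) = l.flatMap pvTranslateB := by
  induction l with
  | nil => rfl
  | cons c l ih =>
    have hc := h c (List.mem_cons_self ..)
    have hlt : c.toNat < 127 := by
      simp [pvDomChar] at hc
      omega
    have heq : pvClean1 (pvLower1 c) = pvTranslateB c := by
      have := pv_key c.toNat (List.mem_range.mpr hlt)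
      simpa [Char.ofNat_toNat] using this
    simp only [List.flatMap_cons, heq, ih (fun x hx => h x (List.mem_cons_of_mem _ hx))]

-- ===== VERDICT (by name: the statement is the Claim_ definition above) =====
theorem mots_questions_spec : Claim_equal_mots_questions := by
  intro question hdom
  unfold Spec_mots_questions mots_questions mots_questions_alt
  have h1 : (fun (acc : List Char) caractere =>
        if 65 ≤ caractere.toNat ∧ caractere.toNat ≤ 90 then
          acc ++ [Char.ofNat (caractere.toNat + 32)]
        else acc ++ [caractere]) = fun acc c => acc ++ [pvLower1 c] := by
    funext acc c
    unfold pvLower1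
    split <;> rfl
  have h2 : (fun (acc : List Char) caractere =>
        if caractere.toNat ∈ ([33, 34, 44, 46, 58, 59, 63, 96, 130, 132, 133, 145, 146, 147, 148, 149] : List Nat) then
          acc
        else if caractere.toNat = 45 then acc ++ [' ']
        else if caractere.toNat = 39 then acc ++ ['e', ' ']
        else acc ++ [caractere]) = fun acc c => acc ++ pvClean1 c := by
    funext acc c
    unfold pvClean1
    split
    · simp
    · split <;> [rfl; (split <;> rfl)]
  simp only [h1, h2, PySem.List.foldl_append_singleton_eq_map, PySem.List.foldl_append_eq_flatMap,
    List.nil_append, List.flatMap_map]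
  have hmem : ∀ c ∈ question.toList, pvDomChar c = true := by
    simpa [Dom_mots_questions, pvDomStr, List.all_eq_true] using hdom
  rw [pv_flatMap_congr question.toList hmem]
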